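-- pv_equiv track=rewrite | github.com/bartolomej/fri-programming-1 | topovske_bitke.py | najbolj_napaden
-- ===== SOURCE A (Python) =====
-- def se_napadata(top1, top2):
--     return (top1[0] == top2[0] or top1[1] == top2[1]) and top1 != top2
--
-- def napadeni(top, topovi):
--     napada = []
--     for t in topovi:
--         if se_napadata(top, t):
--             napada.append(t)
--     return napada
--
-- def napadenost(top, topovi):
--     return len(napadeni(top, topovi))
--
-- def najbolj_napaden(topovi):
--     max_n = 0
--     max_top = None
--     for t in topovi:
--         n = napadenost(t, topovi)
--         if n > max_n:
--             max_n = n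
--             max_top = t
--     return max_top
-- ===== SOURCE B (Python) =====
-- def najbolj_napaden(topovi):
--     rows = {}
--     for x in [t[0] for t in topovi]:
--         rows[x] = rows.get(x, 0) + 1
--     cols = {}
--     for y in [t[1] for t in topovi]:
--         cols[y] = cols.get(y, 0) + 1
--     pos = {}
--     for t in topovi:
--         pos[t] = pos.get(t, 0) + 1
--     max_n = 0
--     max_top = None
--     for t in topovi:
--         n = rows.get(t[0], 0) + cols.get(t[1], 0) - 2 * pos.get(t, 0)
--         if n > max_n:
--             max_n = n
--             max_top = t
--     return max_top
-- ===== Notes on version B (the rewrite author's own statement) =====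
-- stated objective: faster
-- what changed: Replaces the quadratic all-pairs attack scan with three hash counters (row, column, exact position) built in O(n), then one pass computing each rook's attacker count as rows[x]+cols[y]-2*pos[(x,y)].
import Mathlib
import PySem

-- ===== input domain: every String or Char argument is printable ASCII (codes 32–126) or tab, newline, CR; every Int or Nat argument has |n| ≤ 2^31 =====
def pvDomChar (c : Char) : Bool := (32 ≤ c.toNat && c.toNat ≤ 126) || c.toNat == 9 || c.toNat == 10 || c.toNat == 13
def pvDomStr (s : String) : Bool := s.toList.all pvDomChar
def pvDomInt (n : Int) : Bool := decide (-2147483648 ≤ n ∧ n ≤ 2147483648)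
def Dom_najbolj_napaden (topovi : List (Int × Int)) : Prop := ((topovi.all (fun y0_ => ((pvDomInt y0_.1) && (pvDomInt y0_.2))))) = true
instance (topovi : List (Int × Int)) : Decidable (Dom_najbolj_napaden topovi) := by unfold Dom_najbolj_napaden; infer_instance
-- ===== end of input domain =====

-- B replaces A's quadratic all-pairs scan by O(n) counting dictionaries (faster, asymptotic).

-- ===== PORT A =====
def se_napadata (top1 top2 : Int × Int) : Bool :=
  (top1.1 == top2.1 || top1.2 == top2.2) && top1 != top2

def napadeni (top : Int × Int) (topovi : List (Int × Int)) : List (Int × Int) :=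
  topovi.foldl (fun napada t => if se_napadata top t then napada ++ [t] else napada) []

def napadenost (top : Int × Int) (topovi : List (Int × Int)) : Int :=
  (napadeni top topovi).length

def najbolj_napaden (topovi : List (Int × Int)) : Option (Int × Int) :=
  (topovi.foldl (fun (s : Int × Option (Int × Int)) t =>
      let n := napadenost t topovi
      if n > s.1 then (n, some t) else s) ((0 : Int), none)).2

-- ===== PORT B =====
def najbolj_napaden_alt (topovi : List (Int × Int)) : Option (Int × Int) :=
  let rows := (topovi.map (·.1)).foldl (fun d x => d.insert x (d.getD x 0 + 1)) (PySem.Dict.empty : PySem.Dict Int Int)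
  let cols := (topovi.map (·.2)).foldl (fun d y => d.insert y (d.getD y 0 + 1)) (PySem.Dict.empty : PySem.Dict Int Int)
  let pos := topovi.foldl (fun d t => d.insert t (d.getD t 0 + 1)) (PySem.Dict.empty : PySem.Dict (Int × Int) Int)
  (topovi.foldl (fun (s : Int × Option (Int × Int)) t =>
      let n := rows.getD t.1 0 + cols.getD t.2 0 - 2 * pos.getD t 0
      if n > s.1 then (n, some t) else s) ((0 : Int), none)).2

-- ===== PRECONDITION & SPEC =====
def Spec_najbolj_napaden (topovi : List (Int × Int)) (out : Option (Int × Int)) : Prop := out = najbolj_napaden_alt topovi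
instance (topovi : List (Int × Int)) (out : Option (Int × Int)) : Decidable (Spec_najbolj_napaden topovi out) := by unfold Spec_najbolj_napaden; infer_instance

-- ===== CLAIM (what is proved, stated in full; the proofs are below) =====
def Claim_equal_najbolj_napaden : Prop := ∀ (topovi : List (Int × Int)), Dom_najbolj_napaden topovi → Spec_najbolj_napaden topovi (najbolj_napaden topovi)

-- ===== LEMMAS AND PROOFS =====

-- A's napadenost is the filter length
theorem napadenost_eq_filter (top : Int × Int) (topovi : List (Int × Int)) :
    napadenost top topovi = ((topovi.filter (fun t => se_napadata top t)).length : Int) := by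
  simp [napadenost, napadeni, PySem.List.foldl_append_if]

-- per-rook score: filter length = row count + col count - 2 * position count
theorem score_eq (top : Int × Int) (l : List (Int × Int)) :
    ((l.filter (fun t => se_napadata top t)).length : Int)
      = ((l.map (·.1)).count top.1 : Int) + ((l.map (·.2)).count top.2 : Int)
        - 2 * (l.count top : Int) := by
  induction l with
  | nil => simp
  | cons x xs ih =>
    rcases eq_or_ne x top with hx | hx
    · subst hx
      have hself : se_napadata x x = false := by simp [se_napadata]
      simp [hself, ih]
      omega
    · have hx' : ¬top = x := fun e => hx e.symm
      have hb : (top != x) = true := bne_iff_ne.mpr hx'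
      simp only [se_napadata] at ih ⊢
      by_cases h1 : x.1 = top.1 <;> by_cases h2 : x.2 = top.2
      · exact absurd (Prod.ext h1 h2) hx
      all_goals
        have ex : (x == top) = false := beq_eq_false_iff_ne.mpr hx
        first
          | · have e1 : (top.1 == x.1) = true := beq_iff_eq.mpr h1.symm
              have e1r : (x.1 == top.1) = true := beq_iff_eq.mpr h1
              have e2 : (top.2 == x.2) = false := beq_eq_false_iff_ne.mpr (fun e => h2 e.symm)
              have e2r : (x.2 == top.2) = false := beq_eq_false_iff_ne.mpr h2
              simp [List.count_cons, e1, e1r, e2, e2r, ex, hb, ih]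
              omega
          | · have e1 : (top.1 == x.1) = false := beq_eq_false_iff_ne.mpr (fun e => h1 e.symm)
              have e1r : (x.1 == top.1) = false := beq_eq_false_iff_ne.mpr h1
              have e2 : (top.2 == x.2) = true := beq_iff_eq.mpr h2.symm
              have e2r : (x.2 == top.2) = true := beq_iff_eq.mpr h2
              simp [List.count_cons, e1, e1r, e2, e2r, ex, hb, ih]
              omega
          | · have e1 : (top.1 == x.1) = false := beq_eq_false_iff_ne.mpr (fun e => h1 e.symm)
              have e1r : (x.1 == top.1) = false := beq_eq_false_iff_ne.mpr h1
              have e2 : (top.2 == x.2) = false := beq_eq_false_iff_ne.mpr (fun e => h2 e.symm)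
              have e2r : (x.2 == top.2) = false := beq_eq_false_iff_ne.mpr h2
              simp [List.count_cons, e1, e1r, e2, e2r, ex, hb, ih]

theorem najbolj_napaden_spec : Claim_equal_najbolj_napaden := by
  intro topovi _
  show najbolj_napaden topovi = najbolj_napaden_alt topovi
  unfold najbolj_napaden najbolj_napaden_alt
  congr 1
  apply PySem.List.foldl_congr_mem
  intro s t _
  have hr : ((topovi.map (·.1)).foldl (fun d x => d.insert x (d.getD x 0 + 1)) (PySem.Dict.empty : PySem.Dict Int Int)).getD t.1 0
      = ((topovi.map (·.1)).count t.1 : Int) := by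
    rw [PySem.Dict.foldl_insert_getD_add_one_eq_counter, PySem.Dict.getD_counter]
  have hc : ((topovi.map (·.2)).foldl (fun d y => d.insert y (d.getD y 0 + 1)) (PySem.Dict.empty : PySem.Dict Int Int)).getD t.2 0
      = ((topovi.map (·.2)).count t.2 : Int) := by
    rw [PySem.Dict.foldl_insert_getD_add_one_eq_counter, PySem.Dict.getD_counter]
  have hp : (topovi.foldl (fun d x => d.insert x (d.getD x 0 + 1)) (PySem.Dict.empty : PySem.Dict (Int × Int) Int)).getD t 0
      = (topovi.count t : Int) := by
    rw [PySem.Dict.foldl_insert_getD_add_one_eq_counter, PySem.Dict.getD_counter]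
  simp only [hr, hc, hp, napadenost_eq_filter, score_eq]
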